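-- pv_equiv track=rewrite | github.com/damien911224/Graph2Tree | koco/src/contextual_embeddings.py | combine_num
-- ===== SOURCE A (Python) =====
-- def combine_num(all_tokens):
-- 	num_index = []
-- 	for sent in all_tokens:
-- 		lenSent = len(sent)
-- 		num_index_tmp = []
-- 		for j in range(1, lenSent - 2):
-- 			if j >= lenSent - 2:
-- 				break
-- 			if sent[j][-1] == 'N' and sent[j + 1][-1] == 'U' and sent[j + 2][-1] == 'M':
-- 				sent[j] += 'UM'
-- 				sent.pop(j + 1)
-- 				sent.pop(j + 1)
-- 				lenSent -= 2
-- 				num_index_tmp.append(j)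
-- 		num_index.append(num_index_tmp)
--
-- 	return all_tokens, num_index
-- ===== SOURCE B (Python) =====
-- def combine_num(all_tokens):
--     new_all = []
--     num_index = []
--     for sent in all_tokens:
--         out = []
--         idxs = []
--         i = 0
--         n = len(sent)
--         while i < n:
--             t = sent[i]
--             if (out and i + 2 < n
--                     and t.endswith('N')
--                     and sent[i + 1].endswith('U')
--                     and sent[i + 2].endswith('M')):
--                 idxs.append(len(out))
--                 out.append(t + 'UM')
--                 i += 3
--             else:
--                 out.append(t)
--                 i += 1
--         new_all.append(out)
--         num_index.append(idxs)
--     return new_all, num_index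
-- ===== Notes on version B (the rewrite author's own statement) =====
-- stated objective: alternative
-- what changed: A merges triples by mutating each sentence in place (pop-ing two elements per merge) under an index loop with a break; B instead makes one forward pass over the unchanged sentence, appending either the token or the merged token+'UM' to a fresh output list and recording the output index.
import Mathlib
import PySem

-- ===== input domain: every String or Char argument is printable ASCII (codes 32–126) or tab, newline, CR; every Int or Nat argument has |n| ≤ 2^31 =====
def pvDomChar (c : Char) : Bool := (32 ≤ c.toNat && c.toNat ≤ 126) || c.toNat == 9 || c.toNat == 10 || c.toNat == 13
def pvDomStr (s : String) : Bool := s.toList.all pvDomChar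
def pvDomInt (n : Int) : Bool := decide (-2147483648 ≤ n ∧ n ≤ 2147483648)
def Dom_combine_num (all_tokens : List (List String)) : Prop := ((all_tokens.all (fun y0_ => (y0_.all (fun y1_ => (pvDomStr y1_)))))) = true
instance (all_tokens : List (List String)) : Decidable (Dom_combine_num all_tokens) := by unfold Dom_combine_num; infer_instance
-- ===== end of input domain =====

-- B replaces A's index loop with in-place pops by a single forward pass that builds a
-- fresh token list (alternative structure); return-value equivalence only: A mutates its
-- argument's sentences in place, B does not.

-- ===== PORT A =====
-- sent[j][-1] == c  (Python raises IndexError on "", excluded by Pre_; the port returns false there)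
def pvLastIs (s : String) (c : Char) : Bool := PySem.Str.pyGet? s (-1) == some c

-- the inner `for j in range(1, lenSent - 2)` loop with its break and the in-place
-- `sent[j] += 'UM'; sent.pop(j+1); sent.pop(j+1)` (modelled as take/drop on the list)
def combineNumLoop (js : List Int) (sent : List String) (lenS : Int) (acc : List Int) :
    List String × List Int :=
  match js with
  | [] => (sent, acc)
  | j :: js' =>
    if lenS - 2 ≤ j then (sent, acc)  -- `if j >= lenSent - 2: break`
    else
      if pvLastIs ((PySem.List.pyGet? sent j).getD "") 'N'
          && pvLastIs ((PySem.List.pyGet? sent (j + 1)).getD "") 'U'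
          && pvLastIs ((PySem.List.pyGet? sent (j + 2)).getD "") 'M' then
        combineNumLoop js'
          (sent.take j.toNat ++ [((PySem.List.pyGet? sent j).getD "") ++ "UM"]
            ++ sent.drop (j.toNat + 3))
          (lenS - 2) (acc ++ [j])
      else combineNumLoop js' sent lenS acc

def combineNumSent (sent : List String) : List String × List Int :=
  combineNumLoop (PySem.List.pyRange 1 (PySem.List.len sent - 2)) sent (PySem.List.len sent) []

def combine_num (all_tokens : List (List String)) : List (List String) × List (List Int) :=
  let processed := all_tokens.map combineNumSent
  (processed.map Prod.fst, processed.map Prod.snd)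

-- ===== PORT B =====
-- one forward pass: out/idxs are the built output and merge positions, rest the unread input
def combineAltLoop (out : List String) (idxs : List Int) (rest : List String) :
    List String × List Int :=
  match rest with
  | t :: u :: m :: rest' =>
    if !out.isEmpty && PySem.Str.endswith t "N" && PySem.Str.endswith u "U"
        && PySem.Str.endswith m "M" then
      combineAltLoop (out ++ [t ++ "UM"]) (idxs ++ [(out.length : Int)]) rest'
    else
      combineAltLoop (out ++ [t]) idxs (u :: m :: rest')
  | t :: rest' => combineAltLoop (out ++ [t]) idxs rest'
  | [] => (out, idxs)
  termination_by rest.length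

def combine_num_alt (all_tokens : List (List String)) : List (List String) × List (List Int) :=
  let processed := all_tokens.map (fun sent => combineAltLoop [] [] sent)
  (processed.map Prod.fst, processed.map Prod.snd)

-- ===== PRECONDITION & SPEC =====
-- Pre_ excludes sentences of length ≥ 4 with an empty-string token after position 0: there
-- Python A's `sent[j][-1]` raises IndexError whenever the scan reaches the empty token
-- (it returns normally only when the empty token hides in the last two positions).
def Pre_combine_num (all_tokens : List (List String)) : Prop :=
  ∀ sent ∈ all_tokens, 4 ≤ sent.length → "" ∉ sent.tail
instance (all_tokens : List (List String)) : Decidable (Pre_combine_num all_tokens) := by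
  unfold Pre_combine_num; infer_instance

def pvWitness_combine_num : List (List String) := [["x", "1N", "2U", "3M", "y"]]

def Spec_combine_num (all_tokens : List (List String)) (out : List (List String) × List (List Int)) : Prop := out = combine_num_alt all_tokens
instance (all_tokens : List (List String)) (out : List (List String) × List (List Int)) : Decidable (Spec_combine_num all_tokens out) := by unfold Spec_combine_num; infer_instance

-- ===== CLAIM (what is proved, stated in full; the proofs are below) =====
def Claim_equal_combine_num : Prop := ∀ (all_tokens : List (List String)), Dom_combine_num all_tokens → Pre_combine_num all_tokens → Spec_combine_num all_tokens (combine_num all_tokens)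

-- ===== LEMMAS AND PROOFS =====

-- `s[-1] == c` is `s.endswith(c)`
lemma getLast?_eq_isSuffixOf (cs : List Char) (c : Char) :
    (cs.getLast? == some c) = [c].isSuffixOf cs := by
  rw [Bool.eq_iff_iff]
  simp only [beq_iff_eq, List.isSuffixOf_iff_suffix, List.getLast?_eq_some_iff]
  constructor
  · rintro ⟨ys, rfl⟩; exact ⟨ys, rfl⟩
  · rintro ⟨ys, hy⟩; exact ⟨ys, hy.symm⟩

lemma pvLastIs_eq_endswith (s : String) (c : Char) :
    pvLastIs s c = PySem.Chars.endswith s.toList [c] := by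
  rw [pvLastIs, PySem.Str.pyGet?_eq, PySem.Chars.pyGet?_eq_listPyGet?,
    PySem.List.pyGet?_neg_one, PySem.Chars.endswith, getLast?_eq_isSuffixOf]

-- B's pass leaves a short tail untouched
lemma combineAltLoop_short (out : List String) (idxs : List Int) (rest : List String)
    (h : rest.length ≤ 2) : combineAltLoop out idxs rest = (out ++ rest, idxs) := by
  match rest with
  | [] => simp [combineAltLoop]
  | [a] => simp [combineAltLoop]
  | [a, b] => simp [combineAltLoop]
  | a :: b :: c :: r => simp at h

-- A's loop, run on state (out ++ rest) from position j = |out|, computes B's pass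
lemma loop_eq (k : Nat) : ∀ (rest out : List String) (idxs : List Int) (ub : Int),
    rest.length ≤ k → 1 ≤ out.length → (out.length : Int) + rest.length - 2 ≤ ub →
    combineNumLoop (PySem.List.pyRange (out.length : Int) ub) (out ++ rest)
        ((out.length : Int) + rest.length) idxs
      = combineAltLoop out idxs rest := by
  induction k with
  | zero =>
    intro rest out idxs ub hk h1 hub
    have hr : rest = [] := List.eq_nil_of_length_eq_zero (Nat.le_zero.mp hk)
    subst hr
    rw [combineAltLoop_short out idxs [] (by simp)]
    by_cases h : ub ≤ (out.length : Int)
    · rw [PySem.List.pyRange_one_eq_nil h]; simp [combineNumLoop]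
    · rw [PySem.List.pyRange_one_cons (by omega), combineNumLoop,
        if_pos (by simp)]
  | succ k ih =>
    intro rest out idxs ub hk h1 hub
    by_cases hshort : rest.length ≤ 2
    · rw [combineAltLoop_short out idxs rest hshort]
      by_cases h : ub ≤ (out.length : Int)
      · rw [PySem.List.pyRange_one_eq_nil h]; simp [combineNumLoop]
      · rw [PySem.List.pyRange_one_cons (by omega), combineNumLoop,
          if_pos (by omega)]
    · obtain ⟨t, u, m, rest', rfl⟩ : ∃ t u m rest', rest = t :: u :: m :: rest' := by
        match rest, hshort with
        | t :: u :: m :: rest', _ => exact ⟨t, u, m, rest', rfl⟩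
        | [], h => simp at h
        | [a], h => simp at h
        | [a, b], h => simp at h
      have hlen3 : (t :: u :: m :: rest').length = rest'.length + 3 := by simp
      have hub' : (out.length : Int) + rest'.length + 1 ≤ ub := by
        rw [hlen3] at hub; push_cast at hub ⊢; omega
      rw [PySem.List.pyRange_one_cons (by omega), combineNumLoop,
        if_neg (by rw [hlen3]; push_cast; omega)]
      have e0 : PySem.List.pyGet? (out ++ t :: u :: m :: rest') (out.length : Int)
          = some t := PySem.List.pyGet?_append_length _ _ _
      have e1 : PySem.List.pyGet? (out ++ t :: u :: m :: rest') ((out.length : Int) + 1)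
          = some u := by
        have h := PySem.List.pyGet?_append_right out (t :: u :: m :: rest') 1
        simpa using h
      have e2 : PySem.List.pyGet? (out ++ t :: u :: m :: rest') ((out.length : Int) + 2)
          = some m := by
        have h := PySem.List.pyGet?_append_right out (t :: u :: m :: rest') 2
        simpa using h
      have hne : (!out.isEmpty) = true := by
        cases out with
        | nil => simp at h1
        | cons _ _ => rfl
      have hcond : (pvLastIs ((PySem.List.pyGet? (out ++ t :: u :: m :: rest') (out.length : Int)).getD "") 'N'
            && pvLastIs ((PySem.List.pyGet? (out ++ t :: u :: m :: rest') ((out.length : Int) + 1)).getD "") 'U'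
            && pvLastIs ((PySem.List.pyGet? (out ++ t :: u :: m :: rest') ((out.length : Int) + 2)).getD "") 'M')
          = (!out.isEmpty && PySem.Str.endswith t "N" && PySem.Str.endswith u "U"
            && PySem.Str.endswith m "M") := by
        rw [e0, e1, e2, hne]
        simp only [Option.getD_some, pvLastIs_eq_endswith, PySem.Str.endswith_eq,
          Bool.true_and]
        rfl
      rw [combineAltLoop, hcond]
      by_cases hc : (!out.isEmpty && PySem.Str.endswith t "N" && PySem.Str.endswith u "U"
          && PySem.Str.endswith m "M") = true
      · rw [if_pos hc, if_pos hc]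
        have htake : (out ++ t :: u :: m :: rest').take (out.length : Int).toNat = out := by
          simp [List.take_left']
        have hdrop : (out ++ t :: u :: m :: rest').drop ((out.length : Int).toNat + 3)
            = rest' := by
          rw [Int.toNat_natCast]
          simp
        rw [htake, hdrop, e0]
        have hIH := ih rest' (out ++ [t ++ "UM"]) (idxs ++ [(out.length : Int)]) ub
          (by rw [hlen3] at hk; omega) (by simp) (by simp; omega)
        simp only [List.length_append, List.length_cons, List.length_nil,
          List.append_assoc, List.cons_append, List.nil_append, hlen3] at hIH ⊢
        push_cast at hIH ⊢
        ring_nf at hIH ⊢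
        exact hIH
      · rw [if_neg hc, if_neg hc]
        have hIH := ih (u :: m :: rest') (out ++ [t]) idxs ub
          (by rw [hlen3] at hk; simp at hk ⊢; omega) (by simp) (by simp; omega)
        simp only [List.length_append, List.length_cons, List.length_nil,
          List.append_assoc, List.cons_append, List.nil_append] at hIH ⊢
        push_cast at hIH ⊢
        ring_nf at hIH ⊢
        exact hIH

lemma combineAltLoop_first (t : String) (rest : List String) (idxs : List Int) :
    combineAltLoop [] idxs (t :: rest) = combineAltLoop [t] idxs rest := by
  match rest with
  | [] => simp [combineAltLoop]
  | [a] => simp [combineAltLoop]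
  | a :: b :: r => rw [combineAltLoop]; simp

lemma sent_eq (sent : List String) : combineNumSent sent = combineAltLoop [] [] sent := by
  cases sent with
  | nil =>
    rw [combineNumSent, PySem.List.len_eq]
    rw [PySem.List.pyRange_one_eq_nil (by simp)]
    simp [combineNumLoop, combineAltLoop]
  | cons t rest =>
    rw [combineNumSent, PySem.List.len_eq, combineAltLoop_first]
    have hIH := loop_eq rest.length rest [t] [] ((((t :: rest).length : Int)) - 2)
      (le_refl _) (by simp) (by simp; omega)
    simp only [List.length_cons, List.length_nil, List.singleton_append] at hIH ⊢
    push_cast at hIH ⊢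
    ring_nf at hIH ⊢
    exact hIH

-- ===== VERDICT (by name: the statement is the Claim_ definition above) =====
theorem combine_num_spec : Claim_equal_combine_num := by
  intro all_tokens _ _
  unfold Spec_combine_num combine_num combine_num_alt
  have h : combineNumSent = fun sent => combineAltLoop [] [] sent := funext sent_eq
  rw [h]
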